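-- pv_equiv track=rewrite | github.com/the-omics-os/lobster | lobster/tools/pharmacology_knowledge_graph_service.py | _query_edges
-- ===== SOURCE A (Python) =====
-- from typing import Any, Dict, List, Optional, Tuple, Union
--
-- def _query_edges(
--
--     knowledge_graph: Dict[str, Any],
--     filters: Dict[str, Any]
-- ) -> List[Dict[str, Any]]:
--     """Query edges with filters."""
--     results = []
--
--     for edge in knowledge_graph['edges']:
--         match = True
--         for key, value in filters.items():
--             if edge.get(key) != value:
--                 match = False
--                 break
--
--         if match:
--             results.append(edge)
--
--     return results
-- ===== SOURCE B (Python) =====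
-- def _query_edges(knowledge_graph, filters):
--     """Query edges with filters: narrow the edge list one filter at a time."""
--     results = list(knowledge_graph['edges'])
--     for key, value in filters.items():
--         results = [e for e in results if e.get(key) == value]
--     return results
-- ===== Notes on version B (the rewrite author's own statement) =====
-- stated objective: alternative
-- what changed: Inverts the loop nesting: instead of scanning edges with an inner early-break loop over the filters, B starts from a copy of the edge list and applies one narrowing comprehension per filter.
import Mathlib
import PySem

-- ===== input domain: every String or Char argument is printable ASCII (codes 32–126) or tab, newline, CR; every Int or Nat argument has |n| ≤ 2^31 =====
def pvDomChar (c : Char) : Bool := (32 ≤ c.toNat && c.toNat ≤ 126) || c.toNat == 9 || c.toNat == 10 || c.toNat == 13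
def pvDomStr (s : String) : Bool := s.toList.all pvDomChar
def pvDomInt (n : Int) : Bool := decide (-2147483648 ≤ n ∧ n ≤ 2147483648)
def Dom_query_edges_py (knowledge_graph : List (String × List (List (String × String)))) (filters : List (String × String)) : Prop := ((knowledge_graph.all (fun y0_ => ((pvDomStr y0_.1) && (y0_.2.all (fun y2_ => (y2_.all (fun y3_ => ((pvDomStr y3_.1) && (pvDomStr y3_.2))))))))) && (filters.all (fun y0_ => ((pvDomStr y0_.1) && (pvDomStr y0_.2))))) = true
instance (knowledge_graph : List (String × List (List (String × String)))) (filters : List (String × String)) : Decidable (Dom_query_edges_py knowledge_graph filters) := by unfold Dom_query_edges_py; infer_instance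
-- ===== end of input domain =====

-- B inverts the loop nesting (one narrowing filter pass per filter entry instead of an
-- early-break inner loop per edge); equal return value, no speed claim.

-- ===== PORT A =====
def query_edges_py (knowledge_graph : List (String × List (List (String × String)))) (filters : List (String × String)) : List (List (String × String)) :=
  -- results = []; for edge in knowledge_graph['edges']: …
  -- (Pre_ guarantees the 'edges' key is present, so the getD default is never used)
  (((PySem.Dict.mk knowledge_graph).get? "edges").getD []).foldl
    (fun results edge =>
      -- match = True; for key, value in filters.items(): if edge.get(key) != value: match = False; break
      let m := filters.foldl
        (fun m kv =>
          if m then (if !((PySem.Dict.mk edge).get? kv.1 == some kv.2) then false else m) else m)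
        true
      if m then results ++ [edge] else results)
    []

-- ===== PORT B =====
def query_edges_py_alt (knowledge_graph : List (String × List (List (String × String)))) (filters : List (String × String)) : List (List (String × String)) :=
  filters.foldl
    (fun results kv => results.filter (fun e => (PySem.Dict.mk e).get? kv.1 == some kv.2))
    (((PySem.Dict.mk knowledge_graph).get? "edges").getD [])

-- ===== PRECONDITION & SPEC =====
-- Pre_ excludes exactly the inputs where knowledge_graph has no 'edges' key, on which A raises KeyError.
def Pre_query_edges_py (knowledge_graph : List (String × List (List (String × String)))) (_filters : List (String × String)) : Prop :=
  ((PySem.Dict.mk knowledge_graph).get? "edges").isSome = true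
instance (knowledge_graph : List (String × List (List (String × String)))) (filters : List (String × String)) : Decidable (Pre_query_edges_py knowledge_graph filters) := by unfold Pre_query_edges_py; infer_instance

def pvWitness_query_edges_py : (List (String × List (List (String × String)))) × (List (String × String)) :=
  ([("edges", [[("a", "x")]])], [("a", "x")])

def Spec_query_edges_py (knowledge_graph : List (String × List (List (String × String)))) (filters : List (String × String)) (out : List (List (String × String))) : Prop := out = query_edges_py_alt knowledge_graph filters
instance (knowledge_graph : List (String × List (List (String × String)))) (filters : List (String × String)) (out : List (List (String × String))) : Decidable (Spec_query_edges_py knowledge_graph filters out) := by unfold Spec_query_edges_py; infer_instance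

-- ===== CLAIM =====
def Claim_equal_query_edges_py : Prop := ∀ (knowledge_graph : List (String × List (List (String × String)))) (filters : List (String × String)), Dom_query_edges_py knowledge_graph filters → Pre_query_edges_py knowledge_graph filters → Spec_query_edges_py knowledge_graph filters (query_edges_py knowledge_graph filters)

-- ===== LEMMAS AND PROOFS =====

-- A's inner early-break loop computes the conjunction of all filter tests.
theorem inner_loop_all (edge : List (String × String)) (filters : List (String × String)) (b : Bool) :
    filters.foldl
      (fun m kv =>
        if m then (if !((PySem.Dict.mk edge).get? kv.1 == some kv.2) then false else m) else m)
      b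
    = (b && filters.all (fun kv => (PySem.Dict.mk edge).get? kv.1 == some kv.2)) := by
  induction filters generalizing b with
  | nil => cases b <;> simp
  | cons kv tl ih =>
    rw [List.foldl_cons, ih]
    cases b
    · simp
    · cases h : ((PySem.Dict.mk edge).get? kv.1 == some kv.2) <;> simp [h]

-- B's successive narrowing passes compute one filter by the conjunction of all tests.
theorem narrow_filter_all (filters : List (String × String)) (l : List (List (String × String))) :
    filters.foldl
      (fun results kv => results.filter (fun e => (PySem.Dict.mk e).get? kv.1 == some kv.2)) l
    = l.filter (fun e => filters.all (fun kv => (PySem.Dict.mk e).get? kv.1 == some kv.2)) := by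
  induction filters generalizing l with
  | nil => simp
  | cons kv tl ih =>
    simp only [List.foldl_cons, ih, List.filter_filter, List.all_cons]
    exact List.filter_congr (fun e _ => by rw [Bool.and_comm])

-- ===== VERDICT =====
theorem query_edges_py_spec : Claim_equal_query_edges_py := by
  intro kg filters _ _
  unfold Spec_query_edges_py query_edges_py query_edges_py_alt
  rw [narrow_filter_all]
  generalize ((PySem.Dict.mk kg).get? "edges").getD [] = edges
  simp only [inner_loop_all, Bool.true_and]
  exact (PySem.List.foldl_append_if_eq_filter _ _ _).trans (by simp)
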